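-- pv_equiv track=rewrite | github.com/sunbao/ah32 | src/ah32/server/agentic_chat_api.py | _has_template_literal_delimiter
-- ===== SOURCE A (Python) =====
-- def _has_template_literal_delimiter(code: str) -> bool:
--     """Return True if code contains a backtick (`) outside strings/comments.
--
--     NOTE: Backticks inside normal strings/comments are harmless; we only block template literals
--     because older WPS embedded engines frequently don't support them.
--     """
--     src = str(code or "")
--     if "`" not in src:
--         return False
--
--     mode = "normal"  # normal | single | double | line_comment | block_comment
--     i = 0
--     n = len(src)
--     while i < n:
--         ch = src[i]
--         nxt = src[i + 1] if i + 1 < n else ""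
--
--         if mode == "line_comment":
--             if ch == "\n":
--                 mode = "normal"
--             i += 1
--             continue
--
--         if mode == "block_comment":
--             if ch == "*" and nxt == "/":
--                 i += 2
--                 mode = "normal"
--                 continue
--             i += 1
--             continue
--
--         if mode == "single":
--             if ch == "\\":
--                 i += 2
--                 continue
--             if ch == "'":
--                 mode = "normal"
--             i += 1
--             continue
--
--         if mode == "double":
--             if ch == "\\":
--                 i += 2
--                 continue
--             if ch == '"':
--                 mode = "normal"
--             i += 1
--             continue
--
--         # mode == normal
--         if ch == "/" and nxt == "/":
--             mode = "line_comment"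
--             i += 2
--             continue
--         if ch == "/" and nxt == "*":
--             mode = "block_comment"
--             i += 2
--             continue
--         if ch == "'":
--             mode = "single"
--             i += 1
--             continue
--         if ch == '"':
--             mode = "double"
--             i += 1
--             continue
--         if ch == "`":
--             return True
--
--         i += 1
--
--     return False
-- ===== SOURCE B (Python) =====
-- # Finite automaton: one character per step, no index arithmetic; the two-char
-- # constructs of the language ('//', '/*', '*/', backslash escapes) get their own
-- # intermediate states instead of a lookahead.
-- NORMAL, SLASH, SINGLE, SINGLE_ESC, DOUBLE, DOUBLE_ESC, LINE, BLOCK, BLOCK_STAR, FOUND = range(10)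
--
--
-- def _normal_step(ch):
--     if ch == "/":
--         return SLASH
--     if ch == "'":
--         return SINGLE
--     if ch == '"':
--         return DOUBLE
--     if ch == "`":
--         return FOUND
--     return NORMAL
--
--
-- def _step(st, ch):
--     if st == NORMAL:
--         return _normal_step(ch)
--     if st == SLASH:
--         if ch == "/":
--             return LINE
--         if ch == "*":
--             return BLOCK
--         return _normal_step(ch)
--     if st == SINGLE:
--         if ch == "\\":
--             return SINGLE_ESC
--         return NORMAL if ch == "'" else SINGLE
--     if st == SINGLE_ESC:
--         return SINGLE
--     if st == DOUBLE:
--         if ch == "\\":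
--             return DOUBLE_ESC
--         return NORMAL if ch == '"' else DOUBLE
--     if st == DOUBLE_ESC:
--         return DOUBLE
--     if st == LINE:
--         return NORMAL if ch == "\n" else LINE
--     if st == BLOCK:
--         return BLOCK_STAR if ch == "*" else BLOCK
--     # st == BLOCK_STAR
--     if ch == "/":
--         return NORMAL
--     return BLOCK_STAR if ch == "*" else BLOCK
--
--
-- def _has_template_literal_delimiter(code: str) -> bool:
--     """Return True if code contains a backtick (`) outside strings/comments."""
--     src = str(code or "")
--     if "`" not in src:
--         return False
--     st = NORMAL
--     for ch in src:
--         st = _step(st, ch)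
--         if st == FOUND:
--             return True
--     return False
-- ===== Notes on version B (the rewrite author's own statement) =====
-- stated objective: alternative
-- what changed: Replaced A's index-based scanner (mode string, explicit i/i+1 lookahead and i+=2 jumps) with a pure finite automaton driven one character per step by a transition function: the two-character constructs ('//', '/*', '*/', backslash escapes) become intermediate states (SLASH, BLOCK_STAR, *_ESC) instead of lookahead.
import Mathlib
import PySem

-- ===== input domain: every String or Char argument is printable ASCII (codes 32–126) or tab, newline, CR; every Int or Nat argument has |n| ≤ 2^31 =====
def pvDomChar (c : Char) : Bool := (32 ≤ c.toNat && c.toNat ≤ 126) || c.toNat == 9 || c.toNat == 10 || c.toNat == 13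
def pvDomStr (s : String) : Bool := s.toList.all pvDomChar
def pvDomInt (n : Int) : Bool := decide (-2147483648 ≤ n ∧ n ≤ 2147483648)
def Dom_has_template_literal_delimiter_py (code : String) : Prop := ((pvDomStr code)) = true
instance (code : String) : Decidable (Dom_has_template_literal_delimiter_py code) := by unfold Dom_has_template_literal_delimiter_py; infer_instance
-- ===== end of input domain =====

-- B replaces A's index-based five-mode scanner with a one-character-per-step finite automaton (extra states replace the two-char lookaheads); objective: alternative.


-- ===== PORT A =====
-- the while-loop of A: one step per character position, `mode` is the Python mode string
def pvLoopA (mode : String) (l : List Char) : Bool :=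
  match l with
  | [] => false
  | ch :: rest =>
    let nxt : Option Char := rest.head?     -- src[i+1] if it exists, else "" in Python
    if mode = "line_comment" then
      if ch = '\n' then pvLoopA "normal" rest else pvLoopA "line_comment" rest
    else if mode = "block_comment" then
      if ch = '*' ∧ nxt = some '/' then pvLoopA "normal" rest.tail
      else pvLoopA "block_comment" rest
    else if mode = "single" then
      if ch = '\\' then pvLoopA "single" rest.tail
      else if ch = '\'' then pvLoopA "normal" rest
      else pvLoopA "single" rest
    else if mode = "double" then
      if ch = '\\' then pvLoopA "double" rest.tail
      else if ch = '"' then pvLoopA "normal" rest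
      else pvLoopA "double" rest
    else -- mode == "normal"
      if ch = '/' ∧ nxt = some '/' then pvLoopA "line_comment" rest.tail
      else if ch = '/' ∧ nxt = some '*' then pvLoopA "block_comment" rest.tail
      else if ch = '\'' then pvLoopA "single" rest
      else if ch = '"' then pvLoopA "double" rest
      else if ch = '`' then true
      else pvLoopA "normal" rest
termination_by l.length
decreasing_by all_goals (simp [List.length_tail]; try omega)

def has_template_literal_delimiter_py (code : String) : Bool :=
  let src := code.toList
  if ¬ src.contains '`' then false
  else pvLoopA "normal" src

-- ===== PORT B =====
-- the automaton states of Source B (FOUND included)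
inductive PvSt
  | normal | slash | single | singleEsc | double | doubleEsc | line | block | blockStar | found
deriving DecidableEq, Repr

-- _normal_step of Source B
def pvNormalStep (ch : Char) : PvSt :=
  if ch = '/' then .slash
  else if ch = '\'' then .single
  else if ch = '"' then .double
  else if ch = '`' then .found
  else .normal

-- _step of Source B: the transition function
def pvStep : PvSt → Char → PvSt
  | .normal, ch => pvNormalStep ch
  | .slash, ch => if ch = '/' then .line else if ch = '*' then .block else pvNormalStep ch
  | .single, ch => if ch = '\\' then .singleEsc else if ch = '\'' then .normal else .single
  | .singleEsc, _ => .single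
  | .double, ch => if ch = '\\' then .doubleEsc else if ch = '"' then .normal else .double
  | .doubleEsc, _ => .double
  | .line, ch => if ch = '\n' then .normal else .line
  | .block, ch => if ch = '*' then .blockStar else .block
  | .blockStar, ch => if ch = '/' then .normal else if ch = '*' then .blockStar else .block
  | .found, _ => .found

-- the `for ch in src` loop of Source B with its early return on FOUND
def pvRun (st : PvSt) : List Char → Bool
  | [] => false
  | ch :: rest =>
    let st' := pvStep st ch
    if st' = .found then true else pvRun st' rest

def has_template_literal_delimiter_py_alt (code : String) : Bool :=
  let src := code.toList
  if ¬ src.contains '`' then false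
  else pvRun .normal src

-- ===== PRECONDITION & SPEC =====
def Spec_has_template_literal_delimiter_py (code : String) (out : Bool) : Prop := out = has_template_literal_delimiter_py_alt code
instance (code : String) (out : Bool) : Decidable (Spec_has_template_literal_delimiter_py code out) := by unfold Spec_has_template_literal_delimiter_py; infer_instance

-- ===== CLAIM (what is proved, stated in full; the proofs are below) =====
def Claim_equal_has_template_literal_delimiter_py : Prop := ∀ (code : String), Dom_has_template_literal_delimiter_py code → Spec_has_template_literal_delimiter_py code (has_template_literal_delimiter_py code)

-- ===== LEMMAS AND PROOFS =====

-- the automaton agrees with A's mode machine from every corresponding state;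
-- blockStar describes A's situation "in block mode, previous char was '*'"
theorem pvRun_eq_loopA (n : Nat) : ∀ l : List Char, l.length ≤ n →
    (pvRun .normal l = pvLoopA "normal" l) ∧
    (pvRun .single l = pvLoopA "single" l) ∧
    (pvRun .double l = pvLoopA "double" l) ∧
    (pvRun .line l = pvLoopA "line_comment" l) ∧
    (pvRun .block l = pvLoopA "block_comment" l) ∧
    (pvRun .blockStar l = match l with
      | [] => false
      | d :: r => if d = '/' then pvLoopA "normal" r else pvLoopA "block_comment" (d :: r)) := by
  induction n with
  | zero =>
    intro l hl
    have : l = [] := List.eq_nil_of_length_eq_zero (by omega)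
    subst this
    simp [pvRun, pvLoopA]
  | succ n ih =>
    intro l hl
    match l with
    | [] => simp [pvRun, pvLoopA]
    | c :: r =>
      simp only [List.length_cons] at hl
      have hr : r.length ≤ n := by omega
      refine ⟨?_, ?_, ?_, ?_, ?_, ?_⟩
      · -- normal
        by_cases h1 : c = '/'
        · subst h1
          match r, hr with
          | [], _ => rw [pvLoopA]; rw [pvLoopA]; simp [pvRun, pvStep, pvNormalStep]
          | d :: r', hr =>
            have hr' : r'.length ≤ n := by simp at hr; omega
            by_cases h2 : d = '/'
            · subst h2
              rw [pvLoopA]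
              simp only [pvRun, pvStep, pvNormalStep]
              simp [(ih r' hr').2.2.2.1]
            · by_cases h3 : d = '*'
              · subst h3
                rw [pvLoopA]
                simp only [pvRun, pvStep, pvNormalStep]
                simp [h2, (ih r' hr').2.2.2.2.1]
              · -- '/' followed by an ordinary char: A just advances past '/'
                have hA : pvLoopA "normal" ('/' :: d :: r') = pvLoopA "normal" (d :: r') := by
                  rw [pvLoopA]; simp [h2, h3]
                have hB : pvRun .normal ('/' :: d :: r') = pvRun .normal (d :: r') := by
                  simp [pvRun, pvStep, pvNormalStep, h2, h3]
                rw [hA, hB, (ih (d :: r') hr).1]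
        · by_cases h2 : c = '\''
          · subst h2
            rw [pvLoopA]; simp [pvRun, pvStep, pvNormalStep, (ih r hr).2.1]
          · by_cases h3 : c = '"'
            · subst h3
              rw [pvLoopA]; simp [pvRun, pvStep, pvNormalStep, h1, (ih r hr).2.2.1]
            · by_cases h4 : c = '`'
              · subst h4
                rw [pvLoopA]; simp [pvRun, pvStep, pvNormalStep]
              · rw [pvLoopA]; simp [pvRun, pvStep, pvNormalStep, h1, h2, h3, h4, (ih r hr).1]
      · -- single
        by_cases h1 : c = '\\'
        · subst h1
          match r, hr with
          | [], _ => rw [pvLoopA]; simp [pvRun, pvStep, pvLoopA]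
          | d :: r', hr =>
            have hr' : r'.length ≤ n := by simp at hr; omega
            rw [pvLoopA]
            simp [pvRun, pvStep, (ih r' hr').2.1]
        · by_cases h2 : c = '\''
          · subst h2
            rw [pvLoopA]; simp [pvRun, pvStep, (ih r hr).1]
          · rw [pvLoopA]; simp [pvRun, pvStep, h1, h2, (ih r hr).2.1]
      · -- double
        by_cases h1 : c = '\\'
        · subst h1
          match r, hr with
          | [], _ => rw [pvLoopA]; simp [pvRun, pvStep, pvLoopA]
          | d :: r', hr =>
            have hr' : r'.length ≤ n := by simp at hr; omega
            rw [pvLoopA]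
            simp [pvRun, pvStep, (ih r' hr').2.2.1]
        · by_cases h2 : c = '"'
          · subst h2
            rw [pvLoopA]; simp [pvRun, pvStep, (ih r hr).1]
          · rw [pvLoopA]; simp [pvRun, pvStep, h1, h2, (ih r hr).2.2.1]
      · -- line comment
        by_cases h1 : c = '\n'
        · subst h1
          rw [pvLoopA]; simp [pvRun, pvStep, (ih r hr).1]
        · rw [pvLoopA]; simp [pvRun, pvStep, h1, (ih r hr).2.2.2.1]
      · -- block comment
        by_cases h1 : c = '*'
        · subst h1
          have hstar := (ih r hr).2.2.2.2.2
          have hB : pvRun .block ('*' :: r) = pvRun .blockStar r := by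
            simp [pvRun, pvStep]
          rw [hB, hstar]
          match r with
          | [] => simp [pvLoopA]
          | d :: r' =>
            by_cases h3 : d = '/'
            · subst h3
              conv_rhs => rw [pvLoopA.eq_def]
              simp
            · conv_rhs => rw [pvLoopA.eq_def]
              simp [h3]
        · have hB : pvRun .block (c :: r) = pvRun .block r := by
            simp [pvRun, pvStep, h1]
          have hA : pvLoopA "block_comment" (c :: r) = pvLoopA "block_comment" r := by
            rw [pvLoopA.eq_def]; simp [h1]
          rw [hB, (ih r hr).2.2.2.2.1, hA]
      · -- blockStar: A is in block mode just after a '*'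
        by_cases h1 : c = '/'
        · subst h1
          simp [pvRun, pvStep, (ih r hr).1]
        · by_cases h2 : c = '*'
          · subst h2
            have hstar := (ih r hr).2.2.2.2.2
            have hB : pvRun .blockStar ('*' :: r) = pvRun .blockStar r := by
              simp [pvRun, pvStep]
            rw [hB, hstar]
            change _ = if ('*' : Char) = '/' then pvLoopA "normal" r
                       else pvLoopA "block_comment" ('*' :: r)
            rw [if_neg (by decide)]
            match r with
            | [] => simp [pvLoopA]
            | d :: r' =>
              by_cases h3 : d = '/'
              · subst h3
                conv_rhs => rw [pvLoopA.eq_def]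
                simp
              · conv_rhs => rw [pvLoopA.eq_def]
                simp [h3]
          · have hB : pvRun .blockStar (c :: r) = pvRun .block r := by
              simp [pvRun, pvStep, h1, h2]
            have hA : pvLoopA "block_comment" (c :: r) = pvLoopA "block_comment" r := by
              rw [pvLoopA.eq_def]; simp [h2]
            change _ = if c = '/' then pvLoopA "normal" r else pvLoopA "block_comment" (c :: r)
            rw [hB, (ih r hr).2.2.2.2.1, if_neg h1, hA]

-- ===== VERDICT (by name: the statement is the Claim_ definition above) =====
theorem has_template_literal_delimiter_py_spec : Claim_equal_has_template_literal_delimiter_py := by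
  intro code _
  unfold Spec_has_template_literal_delimiter_py has_template_literal_delimiter_py has_template_literal_delimiter_py_alt
  simp only []
  split
  · rfl
  · exact ((pvRun_eq_loopA code.toList.length code.toList le_rfl).1).symm
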